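-- pv_equiv track=rewrite | github.com/aditeepandey/project | utils/recommendation_engine.py | generate_skill_steps
-- ===== SOURCE A (Python) =====
-- def generate_skill_steps(required_skills, user_skills):
--     """
--     Generate skill upskilling steps based on gaps
--
--     Args:
--         required_skills (list): Skills required for the career
--         user_skills (list): User's current skills
--
--     Returns:
--         list: List of skill upskilling steps
--     """
--     steps = []
--     user_skills_lower = [s.lower() for s in user_skills]
--
--     # Find missing skills
--     missing_skills = [skill for skill in required_skills if skill.lower() not in user_skills_lower]
--
--     if missing_skills:
--         # Group similar skills to avoid too many steps
--         skill_categories = {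
--             'technical': [],
--             'soft': [],
--             'industry': []
--         }
--
--         # Simple categorization
--         for skill in missing_skills:
--             skill_lower = skill.lower()
--             if any(tech in skill_lower for tech in
--                    ['programming', 'coding', 'software', 'data', 'technical', 'analysis']):
--                 skill_categories['technical'].append(skill)
--             elif any(soft in skill_lower for soft in
--                      ['communication', 'leadership', 'teamwork', 'management', 'problem']):
--                 skill_categories['soft'].append(skill)
--             else:
--                 skill_categories['industry'].append(skill)
--
--         # Create steps for non-empty categories
--         if skill_categories['technical']:
--             tech_skills = ', '.join(skill_categories['technical'])
--             step = {
--                 'title': 'Develop Technical Skills',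
--                 'description': f'Focus on acquiring these technical skills: {tech_skills}',
--                 'resources': 'Coursera, Udemy, edX, freeCodeCamp'
--             }
--             steps.append(step)
--
--         if skill_categories['soft']:
--             soft_skills = ', '.join(skill_categories['soft'])
--             step = {
--                 'title': 'Enhance Soft Skills',
--                 'description': f'Develop these important soft skills: {soft_skills}',
--                 'resources': 'LinkedIn Learning, Books, Toastmasters, Workshops'
--             }
--             steps.append(step)
--
--         if skill_categories['industry']:
--             industry_skills = ', '.join(skill_categories['industry'])
--             step = {
--                 'title': 'Acquire Industry-Specific Knowledge',
--                 'description': f'Learn these industry-specific skills: {industry_skills}',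
--                 'resources': 'Industry Associations, Specialized Courses, Online Forums'
--             }
--             steps.append(step)
--
--     return steps
-- ===== SOURCE B (Python) =====
-- _CATS = [
--     (['programming', 'coding', 'software', 'data', 'technical', 'analysis'],
--      'Develop Technical Skills',
--      'Focus on acquiring these technical skills: ',
--      'Coursera, Udemy, edX, freeCodeCamp'),
--     (['communication', 'leadership', 'teamwork', 'management', 'problem'],
--      'Enhance Soft Skills',
--      'Develop these important soft skills: ',
--      'LinkedIn Learning, Books, Toastmasters, Workshops'),
-- ]
-- _FALLBACK = ('Acquire Industry-Specific Knowledge',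
--              'Learn these industry-specific skills: ',
--              'Industry Associations, Specialized Courses, Online Forums')
--
--
-- def _step(title, prefix, resources, skills):
--     return {'title': title,
--             'description': prefix + ', '.join(skills),
--             'resources': resources}
--
--
-- def generate_skill_steps(required_skills, user_skills):
--     # staged sieve: each category filters its matches out of the remaining
--     # skills; whatever survives every sieve is industry-specific.
--     known = [s.lower() for s in user_skills]
--     remaining = [s for s in required_skills if s.lower() not in known]
--     steps = []
--     for keywords, title, prefix, resources in _CATS:
--         hit = [s for s in remaining if any(k in s.lower() for k in keywords)]
--         remaining = [s for s in remaining if not any(k in s.lower() for k in keywords)]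
--         if hit:
--             steps.append(_step(title, prefix, resources, hit))
--     if remaining:
--         title, prefix, resources = _FALLBACK
--         steps.append(_step(title, prefix, resources, remaining))
--     return steps
-- ===== Notes on version B (the rewrite author's own statement) =====
-- stated objective: alternative
-- what changed: Replaces A's single classification pass (if/elif chain filling three named buckets, then three copy-pasted step blocks) by a staged sieve: each category spec in turn filters its matches out of the remaining missing skills and emits its step immediately via one shared step builder, and whatever survives all sieves becomes the industry step.
import Mathlib
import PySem

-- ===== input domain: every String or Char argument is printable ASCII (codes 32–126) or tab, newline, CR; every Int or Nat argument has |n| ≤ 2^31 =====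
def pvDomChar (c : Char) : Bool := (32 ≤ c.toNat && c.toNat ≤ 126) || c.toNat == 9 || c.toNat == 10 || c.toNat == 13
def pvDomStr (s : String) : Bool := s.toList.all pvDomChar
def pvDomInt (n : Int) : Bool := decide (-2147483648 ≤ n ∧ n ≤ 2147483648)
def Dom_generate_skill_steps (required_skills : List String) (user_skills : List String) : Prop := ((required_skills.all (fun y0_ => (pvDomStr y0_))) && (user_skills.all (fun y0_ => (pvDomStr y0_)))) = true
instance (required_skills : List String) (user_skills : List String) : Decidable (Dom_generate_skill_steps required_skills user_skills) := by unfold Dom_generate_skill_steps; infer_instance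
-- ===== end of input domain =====

-- B re-implements A as a staged sieve (each category spec filters its matches out of the remaining
-- missing skills; survivors become the industry step) instead of A's single classification pass
-- with hard-coded branches and per-category step blocks; objective: alternative decomposition.

-- ===== PORT A =====
-- A's fixed-key dict {'technical': [], 'soft': [], 'industry': []} is transliterated as a triple
-- (technical, soft, industry); list.append becomes ++ [skill] on the matching component.
def pvTechWords : List String :=
  ["programming", "coding", "software", "data", "technical", "analysis"]
def pvSoftWords : List String :=
  ["communication", "leadership", "teamwork", "management", "problem"]

def generate_skill_steps (required_skills : List String) (user_skills : List String) :
    List (List (String × String)) :=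
  let steps : List (List (String × String)) := []
  let user_skills_lower := user_skills.map PySem.Str.lower
  let missing_skills := required_skills.filter
    (fun skill => !(user_skills_lower.contains (PySem.Str.lower skill)))
  if !missing_skills.isEmpty then
    let cats := missing_skills.foldl
      (fun (c : List String × List String × List String) skill =>
        let skill_lower := PySem.Str.lower skill
        if pvTechWords.any (fun tech => PySem.Str.isIn tech skill_lower) then
          (c.1 ++ [skill], c.2.1, c.2.2)
        else if pvSoftWords.any (fun soft => PySem.Str.isIn soft skill_lower) then
          (c.1, c.2.1 ++ [skill], c.2.2)
        else
          (c.1, c.2.1, c.2.2 ++ [skill]))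
      ([], [], [])
    let steps := if !cats.1.isEmpty then
        steps ++ [[("title", "Develop Technical Skills"),
                   ("description", "Focus on acquiring these technical skills: " ++
                      PySem.Str.join ", " cats.1),
                   ("resources", "Coursera, Udemy, edX, freeCodeCamp")]]
      else steps
    let steps := if !cats.2.1.isEmpty then
        steps ++ [[("title", "Enhance Soft Skills"),
                   ("description", "Develop these important soft skills: " ++
                      PySem.Str.join ", " cats.2.1),
                   ("resources", "LinkedIn Learning, Books, Toastmasters, Workshops")]]
      else steps
    let steps := if !cats.2.2.isEmpty then
        steps ++ [[("title", "Acquire Industry-Specific Knowledge"),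
                   ("description", "Learn these industry-specific skills: " ++
                      PySem.Str.join ", " cats.2.2),
                   ("resources", "Industry Associations, Specialized Courses, Online Forums")]]
      else steps
    steps
  else
    steps

-- ===== PORT B =====
-- category spec = (keyword list, title, description prefix, resources); the fallback has no keywords
def pvCats : List (List String × String × String × String) :=
  [(["programming", "coding", "software", "data", "technical", "analysis"],
    "Develop Technical Skills",
    "Focus on acquiring these technical skills: ",
    "Coursera, Udemy, edX, freeCodeCamp"),
   (["communication", "leadership", "teamwork", "management", "problem"],
    "Enhance Soft Skills",
    "Develop these important soft skills: ",
    "LinkedIn Learning, Books, Toastmasters, Workshops")]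
def pvFallback : String × String × String :=
  ("Acquire Industry-Specific Knowledge",
   "Learn these industry-specific skills: ",
   "Industry Associations, Specialized Courses, Online Forums")

def pvStep (title pfx res : String) (skills : List String) : List (String × String) :=
  [("title", title), ("description", pfx ++ PySem.Str.join ", " skills), ("resources", res)]

def generate_skill_steps_alt (required_skills : List String) (user_skills : List String) :
    List (List (String × String)) :=
  let known := user_skills.map PySem.Str.lower
  let remaining := required_skills.filter (fun s => !(known.contains (PySem.Str.lower s)))
  let sieved := pvCats.foldl
    (fun (acc : List (List (String × String)) × List String) cat =>
      let hit := acc.2.filter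
        (fun s => cat.1.any (fun k => PySem.Str.isIn k (PySem.Str.lower s)))
      let rem := acc.2.filter
        (fun s => !(cat.1.any (fun k => PySem.Str.isIn k (PySem.Str.lower s))))
      (if !hit.isEmpty then acc.1 ++ [pvStep cat.2.1 cat.2.2.1 cat.2.2.2 hit] else acc.1, rem))
    ([], remaining)
  if !sieved.2.isEmpty then
    sieved.1 ++ [pvStep pvFallback.1 pvFallback.2.1 pvFallback.2.2 sieved.2]
  else
    sieved.1

-- ===== PRECONDITION & SPEC =====
def Spec_generate_skill_steps (required_skills : List String) (user_skills : List String) (out : List (List (String × String))) : Prop := out = generate_skill_steps_alt required_skills user_skills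
instance (required_skills : List String) (user_skills : List String) (out : List (List (String × String))) : Decidable (Spec_generate_skill_steps required_skills user_skills out) := by unfold Spec_generate_skill_steps; infer_instance

-- ===== CLAIM =====
def Claim_equal_generate_skill_steps : Prop := ∀ (required_skills : List String) (user_skills : List String), Dom_generate_skill_steps required_skills user_skills → Spec_generate_skill_steps required_skills user_skills (generate_skill_steps required_skills user_skills)

-- ===== LEMMAS AND PROOFS =====

-- category predicates (used only by the proofs)
def pvP0 (x : String) : Bool :=
  pvTechWords.any (fun t => PySem.Str.isIn t (PySem.Str.lower x))
def pvP1 (x : String) : Bool :=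
  !pvP0 x && pvSoftWords.any (fun t => PySem.Str.isIn t (PySem.Str.lower x))
def pvP2 (x : String) : Bool :=
  !pvP0 x && !(pvSoftWords.any (fun t => PySem.Str.isIn t (PySem.Str.lower x)))

lemma pv_A_fold (l : List String) :
    ∀ t s i : List String,
      l.foldl
        (fun (c : List String × List String × List String) skill =>
          if pvTechWords.any (fun tech => PySem.Str.isIn tech (PySem.Str.lower skill)) then
            (c.1 ++ [skill], c.2.1, c.2.2)
          else if pvSoftWords.any (fun soft => PySem.Str.isIn soft (PySem.Str.lower skill)) then
            (c.1, c.2.1 ++ [skill], c.2.2)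
          else
            (c.1, c.2.1, c.2.2 ++ [skill])) (t, s, i)
      = (t ++ l.filter pvP0, s ++ l.filter pvP1, i ++ l.filter pvP2) := by
  induction l with
  | nil => intro t s i; simp
  | cons x xs ih =>
    intro t s i
    cases h0 : pvTechWords.any (fun t => PySem.Str.isIn t (PySem.Str.lower x)) <;>
      cases h1 : pvSoftWords.any (fun t => PySem.Str.isIn t (PySem.Str.lower x)) <;>
        simp only [List.foldl_cons, List.filter_cons, pvP0, pvP1, pvP2, h0, h1,
          Bool.not_false, Bool.not_true, Bool.true_and, Bool.false_and, Bool.and_self,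
          Bool.false_eq_true, if_true, if_false, ih, List.append_assoc,
          List.singleton_append]

lemma pv_filter_tech (l : List String) :
    l.filter (fun s => (["programming", "coding", "software", "data", "technical",
        "analysis"] : List String).any (fun k => PySem.Str.isIn k (PySem.Str.lower s)))
    = l.filter pvP0 := by
  apply List.filter_congr
  intro x _
  simp [pvP0, pvTechWords]

lemma pv_filter_soft (l : List String) :
    (l.filter (fun s => !((["programming", "coding", "software", "data", "technical",
        "analysis"] : List String).any (fun k => PySem.Str.isIn k (PySem.Str.lower s))))).filter
      (fun s => (["communication", "leadership", "teamwork", "management",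
        "problem"] : List String).any (fun k => PySem.Str.isIn k (PySem.Str.lower s)))
    = l.filter pvP1 := by
  rw [List.filter_filter]
  apply List.filter_congr
  intro x _
  simp only [pvP1, pvP0, pvTechWords, pvSoftWords]
  exact Bool.and_comm _ _

lemma pv_filter_industry (l : List String) :
    (l.filter (fun s => !((["programming", "coding", "software", "data", "technical",
        "analysis"] : List String).any (fun k => PySem.Str.isIn k (PySem.Str.lower s))))).filter
      (fun s => !((["communication", "leadership", "teamwork", "management",
        "problem"] : List String).any (fun k => PySem.Str.isIn k (PySem.Str.lower s))))
    = l.filter pvP2 := by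
  rw [List.filter_filter]
  apply List.filter_congr
  intro x _
  simp only [pvP2, pvP0, pvTechWords, pvSoftWords]
  exact Bool.and_comm _ _

-- ===== VERDICT =====
theorem generate_skill_steps_spec : Claim_equal_generate_skill_steps := by
  intro r u _
  unfold Spec_generate_skill_steps
  simp only [generate_skill_steps, generate_skill_steps_alt]
  rw [pv_A_fold]
  generalize (List.filter
      (fun skill => !(List.map PySem.Str.lower u).contains (PySem.Str.lower skill)) r) = m
  simp only [pvCats, List.foldl_cons, List.foldl_nil, List.nil_append,
    pv_filter_tech, pv_filter_soft, pv_filter_industry]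
  by_cases hme : m = []
  · subst hme; simp [pvP0, pvP1, pvP2]
  · have hg : (!m.isEmpty) = true := by simp [hme]
    rw [hg]
    simp only [if_true]
    cases e0 : (m.filter pvP0).isEmpty <;>
      cases e1 : (m.filter pvP1).isEmpty <;>
        cases e2 : (m.filter pvP2).isEmpty <;>
          simp [pvStep, pvFallback, e0, e1, e2]
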